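-- pv_equiv track=rewrite | github.com/singularity-ng/singularity-language-registry | scripts/sync_linguist_patterns.py | categorize_patterns
-- ===== SOURCE A (Python) =====
-- from typing import List, Set
--
-- def categorize_patterns(patterns: Set[str]) -> dict:
--     """
--     Categorize patterns into:
--     - Vendored: node_modules/, vendor/, .yarn/, etc.
--     - Generated: .pb.rs, .generated.ts, etc.
--     - Binary: .png, .jpg, .exe, etc.
--     """
--     categories = {
--         'vendored': set(),
--         'generated': set(),
--         'binary': set(),
--     }
--
--     binary_extensions = {'.png', '.jpg', '.jpeg', '.gif', '.bmp', '.zip', '.tar', '.exe', '.dll', '.pdf'}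
--
--     for pattern in patterns:
--         if any(pattern.startswith(v) for v in ['node_modules', 'vendor', '.yarn', '.idea', 'dist', 'build']):
--             categories['vendored'].add(pattern)
--         elif pattern.startswith('.'):
--             # It's an extension
--             if any(pattern == ext for ext in binary_extensions):
--                 categories['binary'].add(pattern)
--             elif 'generated' in pattern.lower() or 'pb' in pattern or 'proto' in pattern:
--                 categories['generated'].add(pattern)
--         else:
--             categories['vendored'].add(pattern)
--
--     return categories
-- ===== SOURCE B (Python) =====
-- VENDORED_PREFIXES = ['node_modules', 'vendor', '.yarn', '.idea', 'dist', 'build']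
-- BINARY_EXTENSIONS = {'.png', '.jpg', '.jpeg', '.gif', '.bmp', '.zip', '.tar', '.exe', '.dll', '.pdf'}
--
--
-- def _has_vendored_prefix(p):
--     return any(p.startswith(v) for v in VENDORED_PREFIXES)
--
--
-- def _is_vendored(p):
--     return _has_vendored_prefix(p) or not p.startswith('.')
--
--
-- def _is_generated(p):
--     return (p.startswith('.') and not _has_vendored_prefix(p)
--             and p not in BINARY_EXTENSIONS
--             and ('generated' in p.lower() or 'pb' in p or 'proto' in p))
--
--
-- def _is_binary(p):
--     return p in BINARY_EXTENSIONS and not _has_vendored_prefix(p)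
--
--
-- def categorize_patterns(patterns):
--     return {
--         'vendored': {p for p in patterns if _is_vendored(p)},
--         'generated': {p for p in patterns if _is_generated(p)},
--         'binary': {p for p in patterns if _is_binary(p)},
--     }
-- ===== Notes on version B (the rewrite author's own statement) =====
-- stated objective: simpler
-- what changed: The single loop with a nested elif cascade mutating a dict of sets is replaced by three independent set comprehensions, one per category, each with an explicit closed predicate that encodes the original branch priority.
import Mathlib
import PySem

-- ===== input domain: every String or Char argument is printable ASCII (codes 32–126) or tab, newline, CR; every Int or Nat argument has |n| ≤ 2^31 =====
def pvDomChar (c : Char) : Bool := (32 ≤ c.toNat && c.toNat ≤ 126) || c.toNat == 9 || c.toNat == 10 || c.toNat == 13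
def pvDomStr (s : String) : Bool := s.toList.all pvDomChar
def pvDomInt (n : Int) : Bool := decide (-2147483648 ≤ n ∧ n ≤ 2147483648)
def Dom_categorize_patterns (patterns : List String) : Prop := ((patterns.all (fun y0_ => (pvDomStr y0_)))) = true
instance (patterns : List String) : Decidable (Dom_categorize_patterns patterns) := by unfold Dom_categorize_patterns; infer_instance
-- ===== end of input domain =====

-- B replaces A's single loop + elif cascade over a mutable dict of sets by three
-- independent set comprehensions with explicit per-category predicates (objective: simpler).

-- shared constants (the two literal collections both Pythons contain)
def pvVendPrefixes : List String := ["node_modules", "vendor", ".yarn", ".idea", "dist", "build"]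
def pvBinaryExts : PySem.Set String := [".png", ".jpg", ".jpeg", ".gif", ".bmp", ".zip", ".tar", ".exe", ".dll", ".pdf"]

-- ===== PORT A =====
-- the body of A's 'for pattern in patterns' loop, acting on the three category sets
def pvStepA (acc : PySem.Set String × PySem.Set String × PySem.Set String) (pattern : String) :
    PySem.Set String × PySem.Set String × PySem.Set String :=
  let (v, g, b) := acc
  if pvVendPrefixes.any (fun p => PySem.Str.startswith pattern p) then
    (PySem.Set.add v pattern, g, b)
  else if PySem.Str.startswith pattern "." then
    if pvBinaryExts.any (fun ext => pattern == ext) then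
      (v, g, PySem.Set.add b pattern)
    else if PySem.Str.isIn "generated" (PySem.Str.lower pattern) || PySem.Str.isIn "pb" pattern
            || PySem.Str.isIn "proto" pattern then
      (v, PySem.Set.add g pattern, b)
    else (v, g, b)
  else (PySem.Set.add v pattern, g, b)

def categorize_patterns (patterns : List String) : List (String × List String) :=
  let r := patterns.foldl pvStepA (PySem.Set.empty, PySem.Set.empty, PySem.Set.empty)
  [("vendored", r.1), ("generated", r.2.1), ("binary", r.2.2)]

-- ===== PORT B =====
def pvHasVendPrefix (p : String) : Bool := pvVendPrefixes.any (fun v => PySem.Str.startswith p v)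

def pvIsVendored (p : String) : Bool := pvHasVendPrefix p || !PySem.Str.startswith p "."

def pvIsGenerated (p : String) : Bool :=
  PySem.Str.startswith p "." && !pvHasVendPrefix p && !PySem.Set.contains pvBinaryExts p
    && (PySem.Str.isIn "generated" (PySem.Str.lower p) || PySem.Str.isIn "pb" p
        || PySem.Str.isIn "proto" p)

def pvIsBinary (p : String) : Bool := PySem.Set.contains pvBinaryExts p && !pvHasVendPrefix p

def categorize_patterns_alt (patterns : List String) : List (String × List String) :=
  [("vendored", PySem.Set.ofList (patterns.filter pvIsVendored)),
   ("generated", PySem.Set.ofList (patterns.filter pvIsGenerated)),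
   ("binary", PySem.Set.ofList (patterns.filter pvIsBinary))]

-- ===== PRECONDITION & SPEC =====
def Spec_categorize_patterns (patterns : List String) (out : List (String × List String)) : Prop := out = categorize_patterns_alt patterns
instance (patterns : List String) (out : List (String × List String)) : Decidable (Spec_categorize_patterns patterns out) := by unfold Spec_categorize_patterns; infer_instance

-- ===== CLAIM (what is proved, stated in full; the proofs are below) =====
def Claim_equal_categorize_patterns : Prop := ∀ (patterns : List String), Dom_categorize_patterns patterns → Spec_categorize_patterns patterns (categorize_patterns patterns)

-- ===== LEMMAS AND PROOFS =====

-- every binary extension starts with '.'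
lemma pvBin_dot (p : String) (h : PySem.Set.contains pvBinaryExts p = true) :
    PySem.Str.startswith p "." = true := by
  have hm : p ∈ pvBinaryExts := by
    simpa [PySem.Set.contains] using h
  simp only [pvBinaryExts, List.mem_cons, List.not_mem_nil, or_false] at hm
  rcases hm with rfl | rfl | rfl | rfl | rfl | rfl | rfl | rfl | rfl | rfl <;> decide

-- loop invariant: A's fold extends each accumulator by exactly the patterns B's predicate selects
lemma pvLoopA_eq (xs : List String) : ∀ v g b : PySem.Set String,
    xs.foldl pvStepA (v, g, b) =
      (PySem.Set.update v (xs.filter pvIsVendored),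
       PySem.Set.update g (xs.filter pvIsGenerated),
       PySem.Set.update b (xs.filter pvIsBinary)) := by
  induction xs with
  | nil => intro v g b; simp [PySem.Set.update_nil]
  | cons x xs ih =>
    intro v g b
    have e2 : (pvBinaryExts.any fun ext => x == ext) = PySem.Set.contains pvBinaryExts x := by
      rw [List.any_beq]; rfl
    rw [List.foldl_cons]
    cases hv : pvHasVendPrefix x with
    | true =>
      have hv' : (pvVendPrefixes.any fun p => PySem.Str.startswith x p) = true := hv
      have hstep : pvStepA (v, g, b) x = (PySem.Set.add v x, g, b) := by
        simp only [pvStepA, hv']; rfl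
      have hV : pvIsVendored x = true := by
        simp only [pvIsVendored, hv, Bool.true_or]
      have hG : pvIsGenerated x = false := by
        simp only [pvIsGenerated, hv, Bool.not_true, Bool.and_false, Bool.false_and]
      have hB : pvIsBinary x = false := by
        simp only [pvIsBinary, hv, Bool.not_true, Bool.and_false]
      rw [hstep, ih]
      simp [hV, hG, hB, PySem.Set.update_cons]
    | false =>
      have hv' : (pvVendPrefixes.any fun p => PySem.Str.startswith x p) = false := hv
      cases hd : PySem.Str.startswith x "." with
      | false =>
        have hbf : PySem.Set.contains pvBinaryExts x = false := by
          cases hc : PySem.Set.contains pvBinaryExts x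
          · rfl
          · rw [pvBin_dot x hc] at hd; exact Bool.noConfusion hd
        have hstep : pvStepA (v, g, b) x = (PySem.Set.add v x, g, b) := by
          simp only [pvStepA, hv', hd]; rfl
        have hV : pvIsVendored x = true := by
          simp only [pvIsVendored, hv, hd, Bool.not_false, Bool.or_true]
        have hG : pvIsGenerated x = false := by
          simp only [pvIsGenerated, hd, Bool.false_and]
        have hB : pvIsBinary x = false := by
          simp only [pvIsBinary, hbf, Bool.false_and]
        rw [hstep, ih]
        simp [hV, hG, hB, PySem.Set.update_cons]
      | true =>
        cases hb : PySem.Set.contains pvBinaryExts x with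
        | true =>
          have hb' : (pvBinaryExts.any fun ext => x == ext) = true := by rw [e2, hb]
          have hstep : pvStepA (v, g, b) x = (v, g, PySem.Set.add b x) := by
            simp only [pvStepA, hv', hd, hb']; rfl
          have hV : pvIsVendored x = false := by
            simp only [pvIsVendored, hv, hd, Bool.not_true, Bool.or_false]
          have hG : pvIsGenerated x = false := by
            simp only [pvIsGenerated, hb, Bool.not_true, Bool.and_false, Bool.false_and]
          have hB : pvIsBinary x = true := by
            simp only [pvIsBinary, hb, hv, Bool.not_false, Bool.and_true]
          rw [hstep, ih]
          simp [hV, hG, hB, PySem.Set.update_cons]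
        | false =>
          have hb' : (pvBinaryExts.any fun ext => x == ext) = false := by rw [e2, hb]
          cases hm : (PySem.Str.isIn "generated" (PySem.Str.lower x) || PySem.Str.isIn "pb" x
              || PySem.Str.isIn "proto" x) with
          | true =>
            have hstep : pvStepA (v, g, b) x = (v, PySem.Set.add g x, b) := by
              simp only [pvStepA, hv', hd, hb', hm]; rfl
            have hV : pvIsVendored x = false := by
              simp only [pvIsVendored, hv, hd, Bool.not_true, Bool.or_false]
            have hG : pvIsGenerated x = true := by
              simp only [pvIsGenerated, hd, hv, hb, hm, Bool.not_false, Bool.true_and,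
                Bool.and_true]
            have hB : pvIsBinary x = false := by
              simp only [pvIsBinary, hb, Bool.false_and]
            rw [hstep, ih]
            simp [hV, hG, hB, PySem.Set.update_cons]
          | false =>
            have hstep : pvStepA (v, g, b) x = (v, g, b) := by
              simp only [pvStepA, hv', hd, hb', hm]; rfl
            have hV : pvIsVendored x = false := by
              simp only [pvIsVendored, hv, hd, Bool.not_true, Bool.or_false]
            have hG : pvIsGenerated x = false := by
              simp only [pvIsGenerated, hd, hv, hb, hm, Bool.not_false, Bool.true_and,
                Bool.and_true, Bool.and_false]
            have hB : pvIsBinary x = false := by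
              simp only [pvIsBinary, hb, Bool.false_and]
            rw [hstep, ih]
            simp [hV, hG, hB]

-- ===== VERDICT (by name: the statement is the Claim_ definition above) =====
theorem categorize_patterns_spec : Claim_equal_categorize_patterns := by
  intro patterns _
  unfold Spec_categorize_patterns categorize_patterns categorize_patterns_alt
  rw [pvLoopA_eq]
  rfl
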